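-- pv_equiv track=rewrite | github.com/sola-st/CodeMapper | src/anything_tracker/AnythingTrackerUtils.py | locate_lines
-- ===== SOURCE A (Python) =====
-- def locate_lines(line_idx, context_num, unchanged_numbers, start=True):
--     context_lines = []
--     line_abs = line_idx + 1
--
--     if start == True:
--         # if all unchanged numbers is smaller than the specified line number
--         if unchanged_numbers[-1] < line_abs:
--             if len(unchanged_numbers) > context_num:
--                 context_lines = unchanged_numbers[-context_num:]
--             else:
--                 context_lines = unchanged_numbers
--             return context_lines
--
--         tmp = []
--         for num_abs in unchanged_numbers:
--             if num_abs < line_abs: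
--                 tmp.append(num_abs)
--             else:
--                 context_lines = tmp
--                 if len(tmp) > context_num:
--                     context_lines = tmp[-context_num:]
--                 return context_lines
--     else:
--         for num_abs in unchanged_numbers:
--             if len(context_lines) == context_num:
--                 return context_lines
--             if num_abs > line_abs:
--                 context_lines.append(num_abs)
--         return context_lines
-- ===== SOURCE B (Python) =====
-- def locate_lines(line_idx, context_num, unchanged_numbers, start=True):
--     line_abs = line_idx + 1
--     if start:
--         if unchanged_numbers[-1] < line_abs:
--             prefix = unchanged_numbers
--         else:
--             # first index whose value reaches line_abs (exists: the last element does)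
--             stop = next(i for i, x in enumerate(unchanged_numbers) if x >= line_abs)
--             prefix = unchanged_numbers[:stop]
--         return prefix[-context_num:] if len(prefix) > context_num else prefix
--     return [x for x in unchanged_numbers if x > line_abs][:context_num]
-- ===== Notes on version B (the rewrite author's own statement) =====
-- stated objective: simpler
-- what changed: Replaced A's two append-accumulator loops by: find the first index reaching line_abs then slice the prefix (start=True), and a filter comprehension truncated to context_num (start=False), with one shared truncation expression.
-- outside the precondition, e.g. on locate_lines(0, 0, [], True): A raises IndexError, B raises IndexError; on locate_lines(0, -1, [5], False): A returns [5], B returns []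
import Mathlib
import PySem

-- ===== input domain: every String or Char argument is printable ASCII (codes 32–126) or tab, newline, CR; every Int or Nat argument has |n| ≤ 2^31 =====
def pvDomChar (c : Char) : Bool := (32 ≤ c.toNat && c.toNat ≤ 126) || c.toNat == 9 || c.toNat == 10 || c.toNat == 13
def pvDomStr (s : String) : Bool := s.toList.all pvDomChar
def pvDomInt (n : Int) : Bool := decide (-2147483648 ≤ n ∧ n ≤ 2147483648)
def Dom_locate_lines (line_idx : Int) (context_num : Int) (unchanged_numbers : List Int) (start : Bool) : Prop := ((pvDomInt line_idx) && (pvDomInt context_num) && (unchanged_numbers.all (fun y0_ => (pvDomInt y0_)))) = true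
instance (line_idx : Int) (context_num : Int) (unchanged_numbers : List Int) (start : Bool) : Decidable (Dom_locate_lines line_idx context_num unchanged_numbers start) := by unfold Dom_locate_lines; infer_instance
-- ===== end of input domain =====

-- B replaces A's two hand-rolled accumulator loops by find-first-index + slice (start=True)
-- and filter + slice (start=False); objective: simpler (no measured speed difference).


-- ===== PORT A =====
-- 'for num_abs in unchanged_numbers' of the start=True branch: tmp is the accumulator;
-- the [] case (loop falls off the end, Python would return None) is unreachable because the
-- caller only enters the loop when the list's last element is ≥ line_abs.
def locateLoopStart (line_abs : Int) (context_num : Int) : List Int → List Int → List Int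
  | [], _tmp => []
  | num_abs :: rest, tmp =>
    if num_abs < line_abs then
      locateLoopStart line_abs context_num rest (tmp ++ [num_abs])
    else
      if (tmp.length : Int) > context_num then
        PySem.List.slice tmp (some (-context_num)) none
      else
        tmp

-- 'for num_abs in unchanged_numbers' of the start=False branch: context_lines is the accumulator.
def locateLoopEnd (line_abs : Int) (context_num : Int) : List Int → List Int → List Int
  | [], context_lines => context_lines
  | num_abs :: rest, context_lines =>
    if (context_lines.length : Int) = context_num then context_lines
    else if num_abs > line_abs then
      locateLoopEnd line_abs context_num rest (context_lines ++ [num_abs])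
    else
      locateLoopEnd line_abs context_num rest context_lines

def locate_lines (line_idx : Int) (context_num : Int) (unchanged_numbers : List Int) (start : Bool) : List Int :=
  let line_abs := line_idx + 1
  if start = true then
    match PySem.List.pyGet? unchanged_numbers (-1) with
    | none => []  -- IndexError on unchanged_numbers[-1]; excluded by Pre_
    | some last =>
      if last < line_abs then
        if (unchanged_numbers.length : Int) > context_num then
          PySem.List.slice unchanged_numbers (some (-context_num)) none
        else
          unchanged_numbers
      else
        locateLoopStart line_abs context_num unchanged_numbers []
  else
    locateLoopEnd line_abs context_num unchanged_numbers []

-- ===== PORT B =====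
def locate_lines_alt (line_idx : Int) (context_num : Int) (unchanged_numbers : List Int) (start : Bool) : List Int :=
  let line_abs := line_idx + 1
  if start then
    match PySem.List.pyGet? unchanged_numbers (-1) with
    | none => []  -- IndexError on unchanged_numbers[-1]; excluded by Pre_
    | some last =>
      let pfx : List Int :=
        if last < line_abs then unchanged_numbers
        else
          -- next(i for i, x in enumerate(...) if x >= line_abs); then unchanged_numbers[:stop]
          match unchanged_numbers.findIdx? (fun x => line_abs ≤ x) with
          | some stop => PySem.List.slice unchanged_numbers none (some (stop : Int))
          | none => []  -- unreachable: the last element reaches line_abs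
      if (pfx.length : Int) > context_num then
        PySem.List.slice pfx (some (-context_num)) none
      else
        pfx
  else
    -- [x for x in unchanged_numbers if x > line_abs][:context_num]
    PySem.List.slice (unchanged_numbers.filter (fun x => line_abs < x)) none (some context_num)

-- ===== PRECONDITION & SPEC =====
-- Pre_ excludes (a) empty unchanged_numbers with start=True, where A raises IndexError, and
-- (b) negative context_num with start=False, a malformed negative count outside the task's
-- natural domain, where A's collect-everything behaviour is an implementation artefact.
def Pre_locate_lines (line_idx : Int) (context_num : Int) (unchanged_numbers : List Int) (start : Bool) : Prop :=
  (start = true → unchanged_numbers ≠ []) ∧ (start = false → 0 ≤ context_num)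
instance (line_idx : Int) (context_num : Int) (unchanged_numbers : List Int) (start : Bool) : Decidable (Pre_locate_lines line_idx context_num unchanged_numbers start) := by unfold Pre_locate_lines; infer_instance

def pvWitness_locate_lines : Int × Int × List Int × Bool := (4, 2, [1, 3, 4, 7, 9], true)

def Spec_locate_lines (line_idx : Int) (context_num : Int) (unchanged_numbers : List Int) (start : Bool) (out : List Int) : Prop := out = locate_lines_alt line_idx context_num unchanged_numbers start
instance (line_idx : Int) (context_num : Int) (unchanged_numbers : List Int) (start : Bool) (out : List Int) : Decidable (Spec_locate_lines line_idx context_num unchanged_numbers start out) := by unfold Spec_locate_lines; infer_instance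

-- ===== CLAIM (what is proved, stated in full; the proofs are below) =====
def Claim_equal_locate_lines : Prop := ∀ (line_idx : Int) (context_num : Int) (unchanged_numbers : List Int) (start : Bool), Dom_locate_lines line_idx context_num unchanged_numbers start → Pre_locate_lines line_idx context_num unchanged_numbers start → Spec_locate_lines line_idx context_num unchanged_numbers start (locate_lines line_idx context_num unchanged_numbers start)

-- ===== LEMMAS AND PROOFS =====

-- start=False loop computes: keep appending filtered elements until the accumulator reaches length context_num.
lemma loopEnd_eq (la cn : Int) (xs : List Int) : ∀ (acc : List Int), (acc.length : Int) ≤ cn →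
    locateLoopEnd la cn xs acc = acc ++ (xs.filter (fun x => la < x)).take (cn - acc.length).toNat := by
  induction xs with
  | nil => intro acc _; simp [locateLoopEnd]
  | cons n rest ih =>
    intro acc hacc
    by_cases hlen : (acc.length : Int) = cn
    · have : (cn - (acc.length : Int)).toNat = 0 := by omega
      simp [locateLoopEnd, hlen]
    · have hlt : (acc.length : Int) < cn := lt_of_le_of_ne hacc hlen
      by_cases hn : n > la
      · have h1 : ((acc ++ [n]).length : Int) ≤ cn := by simp; omega
        have htn : (cn - (acc.length : Int)).toNat = (cn - ((acc ++ [n]).length : Int)).toNat + 1 := by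
          simp; omega
        simp [locateLoopEnd, hlen, hn, ih _ h1, htn]
      · have hn' : ¬ la < n := by omega
        simp [locateLoopEnd, hlen, hn, ih _ hacc]

-- start=True loop: if some element reaches line_abs, the loop returns the (possibly truncated)
-- accumulated prefix of elements below line_abs.
lemma loopStart_eq (la cn : Int) (xs : List Int) : ∀ (acc : List Int), (∃ x ∈ xs, la ≤ x) →
    locateLoopStart la cn xs acc =
      (let t := acc ++ xs.takeWhile (fun x => decide (x < la));
       if (t.length : Int) > cn then PySem.List.slice t (some (-cn)) none else t) := by
  induction xs with
  | nil => rintro acc ⟨x, hx, -⟩; simp at hx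
  | cons n rest ih =>
    rintro acc ⟨x, hx, hxla⟩
    by_cases hn : n < la
    · have hxr : x ∈ rest := by
        rcases List.mem_cons.mp hx with rfl | h
        · omega
        · exact h
      simp only [locateLoopStart, if_pos hn, ih (acc ++ [n]) ⟨x, hxr, hxla⟩,
        List.takeWhile_cons, show decide (n < la) = true from by simpa using hn]
      simp
    · simp only [locateLoopStart, if_neg hn, List.takeWhile_cons,
        show decide (n < la) = false from by simpa using hn]
      simp

-- B's find-first-index + slice[:stop] equals takeWhile, when a stopping element exists.
lemma findIdx_slice_eq_takeWhile (la : Int) (xs : List Int) (h : ∃ x ∈ xs, la ≤ x) :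
    (match xs.findIdx? (fun x => decide (la ≤ x)) with
     | some stop => PySem.List.slice xs none (some (stop : Int))
     | none => ([] : List Int)) = xs.takeWhile (fun x => decide (x < la)) := by
  induction xs with
  | nil => rcases h with ⟨x, hx, -⟩; simp at hx
  | cons n rest ih =>
    by_cases hn : la ≤ n
    · have hfind : (n :: rest).findIdx? (fun x => decide (la ≤ x)) = some 0 := by
        simp [List.findIdx?_cons, show decide (la ≤ n) = true from by simpa using hn]
      rw [hfind]
      show PySem.List.slice (n :: rest) none (some ((0 : Nat) : Int)) = _
      rw [PySem.List.slice_to_natCast]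
      simp [show decide (n < la) = false from by simp; omega]
    · have h' : ∃ x ∈ rest, la ≤ x := by
        rcases h with ⟨x, hx, hxla⟩
        rcases List.mem_cons.mp hx with rfl | hr
        · omega
        · exact ⟨x, hr, hxla⟩
      have hthis := ih h'
      cases hfi : rest.findIdx? (fun x => decide (la ≤ x)) with
      | none =>
        rcases h' with ⟨x, hx, hxla⟩
        exact absurd (by simpa using List.findIdx?_eq_none_iff.mp hfi x hx) (by omega)
      | some i =>
        simp only [hfi, PySem.List.slice_to_natCast] at hthis
        have hfind : (n :: rest).findIdx? (fun x => decide (la ≤ x)) = some (i + 1) := by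
          simp [List.findIdx?_cons, show decide (la ≤ n) = false from by simpa using hn, hfi]
        rw [hfind]
        show PySem.List.slice (n :: rest) none (some ((i + 1 : Nat) : Int)) = _
        rw [PySem.List.slice_to_natCast]
        simp [show decide (n < la) = true from by simp; omega, List.take_succ_cons, hthis]

-- ===== VERDICT (by name: the statement is the Claim_ definition above) =====
theorem locate_lines_spec : Claim_equal_locate_lines := by
  intro li cn xs st _hDom hPre
  rcases hPre with ⟨h1, h2⟩
  unfold Spec_locate_lines locate_lines locate_lines_alt
  cases st with
  | false =>
    have hcn : 0 ≤ cn := h2 rfl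
    simp only [Bool.false_eq_true, if_false, if_neg (by simp : ¬ (false = true))]
    rw [loopEnd_eq (li + 1) cn xs [] (by simpa using hcn),
      PySem.List.slice_to _ hcn]
    simp
  | true =>
    have hne : xs ≠ [] := h1 rfl
    simp only [if_true, PySem.List.pyGet?_neg_one]
    cases hlast : xs.getLast? with
    | none => exact absurd (List.getLast?_eq_none_iff.mp hlast) hne
    | some last =>
      by_cases hlt : last < li + 1
      · simp [hlt]
      · have hmem : last ∈ xs := List.mem_of_getLast? hlast
        have hex : ∃ x ∈ xs, li + 1 ≤ x := ⟨last, hmem, by omega⟩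
        rw [loopStart_eq (li + 1) cn xs [] hex]
        simp only [hlt, List.nil_append]
        rw [← findIdx_slice_eq_takeWhile (li + 1) xs hex]
        simp
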